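-- pv_equiv track=rewrite | github.com/wangziyannb/fp_growth | main.py | rearrange_dict
-- ===== SOURCE A (Python) =====
-- def rearrange_dict(dic):
--     val = list(dic.values())
--     val.sort(reverse=True)
--     refined_dic = {}
--     for i in dic:
--         index = val.index(dic[i])
--         refined_dic[i] = index
--         val[index] = 'x'
--     return refined_dic
-- ===== SOURCE B (Python) =====
-- def rearrange_dict(dic):
--     # Argsort: stable-sort the items by value descending with an explicit
--     # tie-break on original position; each item's rank is simply its position
--     # in that sorted order.  Scatter positions into a dict keyed by the item's
--     # key, then emit the ranks in the original key order.
--     order = sorted(enumerate(dic.items()), key=lambda t: (-t[1][1], t[0]))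
--     pos = {k: r for r, (_, (k, _)) in enumerate(order)}
--     return {k: pos[k] for k in dic}
-- ===== Notes on version B (the rewrite author's own statement) =====
-- stated objective: faster
-- what changed: A repeatedly scans the descending-sorted value list with list.index and overwrites used slots with an 'x' marker (quadratic); B is an argsort: it stable-sorts the enumerated items once by (-value, original position), so each item's rank is simply its position in that sorted order, scattered into a dict and read back in original key order.
import Mathlib
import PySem

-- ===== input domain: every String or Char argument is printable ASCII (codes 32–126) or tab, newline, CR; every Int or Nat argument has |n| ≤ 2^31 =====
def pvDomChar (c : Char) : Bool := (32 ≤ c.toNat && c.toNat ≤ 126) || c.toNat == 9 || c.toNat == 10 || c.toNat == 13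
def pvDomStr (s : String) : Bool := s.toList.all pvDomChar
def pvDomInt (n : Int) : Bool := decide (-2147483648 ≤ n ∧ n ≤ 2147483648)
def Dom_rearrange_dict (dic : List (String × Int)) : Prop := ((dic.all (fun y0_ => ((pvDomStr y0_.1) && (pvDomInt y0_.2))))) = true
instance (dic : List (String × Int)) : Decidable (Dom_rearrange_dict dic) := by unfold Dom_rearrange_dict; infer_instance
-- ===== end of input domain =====

-- B ranks by ARGSORT: stable-sort the enumerated items by value descending (explicit tie-break on original
-- position), a rank is just a position in that sorted order, scattered into a dict and read back in key order.
-- A instead repeatedly scans the sorted value list with list.index and marks used slots with 'x' (quadratic).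

-- ===== PORT A =====
-- val's 'x' markers are ported as `none` in a List (Option Int) (int == 'x' is False in Python, some v ≠ none here);
-- `for i in dic: dic[i]` reads each key's value, i.e. the pair's second component (dict keys are unique).
-- `.getD 0` is unreachable: dic[i] is always present in val (Python's ValueError cannot occur).
def rearrange_dict (dic : List (String × Int)) : List (String × Int) :=
  let val0 : List (Option Int) := (PySem.List.sorted (dic.map (·.2)) (fun x => x) true).map some
  let st := dic.foldl (fun (st : List (Option Int) × PySem.Dict String Int) kv =>
      let index := (PySem.List.index? st.1 (some kv.2)).getD 0
      (st.1.set index none, st.2.insert kv.1 (index : Int)))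
    (val0, PySem.Dict.empty)
  st.2.items

-- ===== PORT B =====
-- `pos[k]` is ported as `.getD k 0`: every key of dic occurs in order, so Python's KeyError cannot occur.
def rearrange_dict_alt (dic : List (String × Int)) : List (String × Int) :=
  let order := PySem.List.sorted2 (PySem.List.enumerate dic) (fun t => -t.2.2) (fun t => t.1) false
  let pos : PySem.Dict String Int :=
    (PySem.List.enumerate order).foldl (fun d p => d.insert p.2.2.1 p.1) PySem.Dict.empty
  (dic.foldl (fun (d : PySem.Dict String Int) kv => d.insert kv.1 (pos.getD kv.1 0))
    PySem.Dict.empty).items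

-- ===== PRECONDITION & SPEC =====
-- Pre_ only states that dic really is a Python dict: its keys are pairwise distinct (a Python dict cannot
-- hold duplicate keys, so this excludes nothing of A's actual domain).
def Pre_rearrange_dict (dic : List (String × Int)) : Prop := (dic.map (·.1)).Nodup
instance (dic : List (String × Int)) : Decidable (Pre_rearrange_dict dic) := by unfold Pre_rearrange_dict; infer_instance
def pvWitness_rearrange_dict : (List (String × Int)) := [("a", 1), ("b", 1), ("c", 0)]

def Spec_rearrange_dict (dic : List (String × Int)) (out : List (String × Int)) : Prop := out = rearrange_dict_alt dic
instance (dic : List (String × Int)) (out : List (String × Int)) : Decidable (Spec_rearrange_dict dic out) := by unfold Spec_rearrange_dict; infer_instance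

-- ===== CLAIM (what is proved, stated in full; the proofs are below) =====
def Claim_equal_rearrange_dict : Prop := ∀ (dic : List (String × Int)), Dom_rearrange_dict dic → Pre_rearrange_dict dic → Spec_rearrange_dict dic (rearrange_dict dic)

-- ===== LEMMAS AND PROOFS =====

-- number of values strictly greater than v
def pvGt (s : List Int) (v : Int) : Nat := s.countP (fun w => decide (v < w))

-- the lexicographic sort key of B, as a value of the lexicographic product order
def pvKey (t : Int × String × Int) : Int ×ₗ Int := toLex (-t.2.2, t.1)

-- for an enumerated item x, the number of earlier items carrying the same value
def pvEqB (e : List (Int × String × Int)) (x : Int × String × Int) : Nat :=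
  e.countP (fun y => decide (y.1 < x.1 ∧ y.2.2 = x.2.2))

theorem pvGt_head_zero {x : Int} {t : List Int} (hs : (x :: t).Pairwise (· ≥ ·)) :
    pvGt (x :: t) x = 0 := by
  have h := (List.pairwise_cons.mp hs).1
  simp only [pvGt, List.countP_cons]
  have : t.countP (fun w => decide (x < w)) = 0 := by
    rw [List.countP_eq_zero]
    intro w hw
    simpa using not_lt.mpr (h w hw)
  simp [this]

theorem pvGt_cons_of_lt {x v : Int} {t : List Int} (h : v < x) :
    pvGt (x :: t) v = pvGt t v + 1 := by
  simp [pvGt, h]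

-- the value list with, for each value v, its first (c v) occurrences overwritten by the 'x' marker
def pvMask : List Int → (Int → Nat) → List (Option Int)
  | [], _ => []
  | x :: t, c => (if 0 < c x then none else some x) :: pvMask t (fun y => if y = x then c x - 1 else c y)

theorem index?_pvMask (s : List Int) (c : Int → Nat) (v : Int)
    (hs : s.Pairwise (· ≥ ·)) (h : c v < s.count v) :
    PySem.List.index? (pvMask s c) (some v) = some (pvGt s v + c v) := by
  induction s generalizing c with
  | nil => simp at h
  | cons x t ih =>
      have hpc := List.pairwise_cons.mp hs
      by_cases hvx : v = x
      · subst hvx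
        rw [pvGt_head_zero hs]
        by_cases hc : 0 < c v
        · have hbeta : (fun y => if y = v then c v - 1 else c y) v = c v - 1 := by simp
          have hct : (fun y => if y = v then c v - 1 else c y) v < t.count v := by
            rw [hbeta]
            rw [List.count_cons_self] at h; omega
          have hgt : pvGt t v = 0 := by
            rw [pvGt, List.countP_eq_zero]
            intro w hw; simpa using not_lt.mpr (hpc.1 w hw)
          rw [pvMask, if_pos hc, PySem.List.index?_cons_of_ne _ (by simp), ih _ hpc.2 hct]
          rw [if_pos rfl, hgt]
          simp only [Option.map_some]
          congr 1
          omega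
        · have hc0 : c v = 0 := by omega
          have hm : pvMask (v :: t) c = some v :: pvMask t (fun y => if y = v then c v - 1 else c y) := by
            rw [pvMask, if_neg hc]
          rw [hm, PySem.List.index?_cons_self, hc0]
      · have hvt : v ∈ t := by
          have : v ∈ x :: t := List.count_pos_iff.mp (by omega)
          cases this with
          | head => exact absurd rfl hvx
          | tail _ hh => exact hh
        have hlt : v < x := lt_of_le_of_ne (hpc.1 v hvt) hvx
        have hct : (fun y => if y = x then c x - 1 else c y) v < t.count v := by
          simp only [if_neg hvx]
          have hcc : List.count v (x :: t) = List.count v t := by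
            have hxv : ¬ x = v := fun hh => hvx hh.symm
            simp [hxv]
          rw [hcc] at h
          exact h
        have hne : (if 0 < c x then (none : Option Int) else some x) ≠ some v := by
          split
          · simp
          · simpa using fun h => hvx h.symm
        rw [pvMask]
        rw [PySem.List.index?_cons_of_ne _ hne, ih _ hpc.2 hct, pvGt_cons_of_lt hlt]
        simp only [if_neg hvx, Option.map_some]
        congr 1
        omega

theorem set_pvMask (s : List Int) (c : Int → Nat) (v : Int)
    (hs : s.Pairwise (· ≥ ·)) (h : c v < s.count v) :
    (pvMask s c).set (pvGt s v + c v) none = pvMask s (fun y => if y = v then c y + 1 else c y) := by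
  induction s generalizing c with
  | nil => simp at h
  | cons x t ih =>
      have hpc := List.pairwise_cons.mp hs
      by_cases hvx : v = x
      · subst hvx
        rw [pvGt_head_zero hs]
        by_cases hc : 0 < c v
        · have hbeta : (fun y => if y = v then c v - 1 else c y) v = c v - 1 := by simp
          have hct : (fun y => if y = v then c v - 1 else c y) v < t.count v := by
            rw [hbeta]; rw [List.count_cons_self] at h; omega
          have hgt : pvGt t v = 0 := by
            rw [pvGt, List.countP_eq_zero]
            intro w hw; simpa using not_lt.mpr (hpc.1 w hw)
          have hrec := ih (fun y => if y = v then c v - 1 else c y) hpc.2 hct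
          rw [hbeta, hgt, Nat.zero_add] at hrec
          have hfL : (fun y => if y = v then (fun y => if y = v then c v - 1 else c y) y + 1
                      else (fun y => if y = v then c v - 1 else c y) y) =
                     (fun y => if y = v then c v else c y) := by
            funext y
            by_cases hy : y = v
            · simp [hy]; omega
            · simp [hy]
          rw [hfL] at hrec
          have hL : pvMask (v :: t) c = none :: pvMask t (fun y => if y = v then c v - 1 else c y) := by
            rw [pvMask, if_pos hc]
          have hR : pvMask (v :: t) (fun y => if y = v then c y + 1 else c y) =
              none :: pvMask t (fun y => if y = v then c v else c y) := by
            rw [pvMask]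
            congr 1
            · simp
            · congr 1
              funext y
              by_cases hy : y = v
              · simp [hy]
              · simp [hy]
          rw [hL, hR, show 0 + c v = (c v - 1) + 1 from by omega, List.set_cons_succ, hrec]
        · have hc0 : c v = 0 := by omega
          have hL : pvMask (v :: t) c = some v :: pvMask t (fun y => if y = v then c v - 1 else c y) := by
            rw [pvMask, if_neg hc]
          have hR : pvMask (v :: t) (fun y => if y = v then c y + 1 else c y) =
              none :: pvMask t (fun y => if y = v then c v - 1 else c y) := by
            rw [pvMask]
            congr 1
            · simp
            · congr 1
              funext y; by_cases hy : y = v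
              · simp [hy, hc0]
              · simp [hy]
          rw [hL, hR, hc0, Nat.zero_add, List.set_cons_zero]
      · have hvt : v ∈ t := by
          have : v ∈ x :: t := List.count_pos_iff.mp (by omega)
          cases this with
          | head => exact absurd rfl hvx
          | tail _ hh => exact hh
        have hlt : v < x := lt_of_le_of_ne (hpc.1 v hvt) hvx
        have hb2 : (fun y => if y = x then c x - 1 else c y) v = c v := by simp [hvx]
        have hct : (fun y => if y = x then c x - 1 else c y) v < t.count v := by
          rw [hb2]
          have hxv : ¬ x = v := fun hh => hvx hh.symm
          have hcc : List.count v (x :: t) = List.count v t := by simp [hxv]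
          rw [hcc] at h
          exact h
        rw [pvGt_cons_of_lt hlt, pvMask, pvMask]
        rw [show pvGt t v + 1 + c v = (pvGt t v + c v) + 1 from by omega, List.set_cons_succ]
        have hxv : ¬ x = v := fun hh => hvx hh.symm
        have hhead : (if 0 < (if x = v then c x + 1 else c x) then (none : Option Int) else some x) =
            (if 0 < c x then none else some x) := by simp [hxv]
        rw [hhead]
        congr 1
        have hrec := ih (fun y => if y = x then c x - 1 else c y) hpc.2 hct
        rw [hb2] at hrec
        rw [hrec]
        congr 1
        funext y
        by_cases hy : y = v
        · have hyx : ¬ y = x := by rw [hy]; exact hvx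
          simp [hy, hvx]
        · by_cases hyx : y = x
          · simp [hyx, hxv]
          · simp [hy, hyx]

theorem pvMask_zero (s : List Int) : pvMask s (fun _ => 0) = s.map some := by
  induction s with
  | nil => rfl
  | cons x t ih =>
      have hf : (fun y => if y = x then 0 - 1 else (0:Nat)) = (fun _ => (0:Nat)) := by
        funext y; split <;> rfl
      simp only [pvMask, List.map, if_neg (lt_irrefl 0), hf, ih]

-- A's loop, re-expressed: the masked-list state is equivalent to a per-value occurrence counter
theorem A_loop (s : List Int) (hs : s.Pairwise (· ≥ ·)) :
    ∀ (rest : List (String × Int)) (c : Int → Nat) (acc : PySem.Dict String Int),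
    (∀ v, c v + (rest.map (·.2)).count v = s.count v) →
    (rest.foldl (fun (st : List (Option Int) × PySem.Dict String Int) kv =>
        let index := (PySem.List.index? st.1 (some kv.2)).getD 0
        (st.1.set index none, st.2.insert kv.1 (index : Int)))
      (pvMask s c, acc)).2 =
    (rest.foldl (fun (p : PySem.Dict String Int × (Int → Nat)) kv =>
        (p.1.insert kv.1 ((pvGt s kv.2 + p.2 kv.2 : Nat) : Int),
         fun y => if y = kv.2 then p.2 y + 1 else p.2 y))
      (acc, c)).1 := by
  intro rest
  induction rest with
  | nil => intro c acc _; rfl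
  | cons kv r ih =>
      intro c acc hcnt
      obtain ⟨k, v⟩ := kv
      have hcv : c v < s.count v := by
        have h1 := hcnt v
        rw [List.map_cons, List.count_cons_self] at h1
        omega
      have hidx : PySem.List.index? (pvMask s c) (some v) = some (pvGt s v + c v) :=
        index?_pvMask s c v hs hcv
      rw [List.foldl_cons, List.foldl_cons]
      simp only [hidx, Option.getD_some]
      rw [set_pvMask s c v hs hcv]
      exact ih (fun y => if y = v then c y + 1 else c y)
        (acc.insert k ((pvGt s v + c v : Nat) : Int))
        (by
          intro w
          by_cases hw : w = v
          · subst hw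
            have h1 := hcnt w
            rw [List.map_cons, List.count_cons_self] at h1
            simp
            omega
          · have h1 := hcnt w
            have hvw : ¬ v = w := fun hh => hw hh.symm
            rw [List.map_cons] at h1
            have hcc : List.count w (v :: List.map (fun x => x.2) r) =
                List.count w (List.map (fun x => x.2) r) := by simp [hvw]
            rw [hcc] at h1
            simp only [if_neg hw]
            omega)

-- the running per-value counter IS the count of earlier items with the same value
theorem counter_to_rank (s : List Int) (m : Int × String × Int → Nat) :
    ∀ (rest : List (Int × String × Int)) (c : Int → Nat) (acc : PySem.Dict String Int),
    rest.Pairwise (fun a b => a.1 < b.1) →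
    (∀ x ∈ rest, m x = c x.2.2 + rest.countP (fun y => decide (y.1 < x.1 ∧ y.2.2 = x.2.2))) →
    (rest.foldl (fun (p : PySem.Dict String Int × (Int → Nat)) t =>
        (p.1.insert t.2.1 ((pvGt s t.2.2 + p.2 t.2.2 : Nat) : Int),
         fun y => if y = t.2.2 then p.2 y + 1 else p.2 y))
      (acc, c)).1 =
    rest.foldl (fun d t => d.insert t.2.1 ((pvGt s t.2.2 + m t : Nat) : Int)) acc := by
  intro rest
  induction rest with
  | nil => intro c acc _ _; rfl
  | cons x r ih =>
      intro c acc hpw hm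
      have hpc := List.pairwise_cons.mp hpw
      have hmx : m x = c x.2.2 := by
        have h1 := hm x (List.mem_cons_self)
        have h0 : List.countP (fun y => decide (y.1 < x.1 ∧ y.2.2 = x.2.2)) (x :: r) = 0 := by
          rw [List.countP_eq_zero]
          intro y hy
          rcases List.mem_cons.mp hy with hy | hy
          · subst hy; simp
          · have := hpc.1 y hy
            simp only [decide_eq_true_eq]
            omega
        rw [h0] at h1
        omega
      rw [List.foldl_cons, List.foldl_cons, hmx]
      exact ih (fun y => if y = x.2.2 then c y + 1 else c y)
        (acc.insert x.2.1 ((pvGt s x.2.2 + c x.2.2 : Nat) : Int))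
        hpc.2
        (by
          intro x' hx'
          have h1 := hm x' (List.mem_cons_of_mem _ hx')
          have hlt : x.1 < x'.1 := hpc.1 x' hx'
          rw [List.countP_cons] at h1
          beta_reduce
          by_cases hv : x.2.2 = x'.2.2
          · rw [if_pos hv.symm]
            rw [show decide (x.1 < x'.1 ∧ x.2.2 = x'.2.2) = true from by simp [hlt, hv], if_pos rfl] at h1
            omega
          · rw [if_neg (fun hh => hv hh.symm)]
            rw [show decide (x.1 < x'.1 ∧ x.2.2 = x'.2.2) = false from by simp [hv],
              if_neg Bool.false_ne_true] at h1
            omega)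

-- folding insert over a list whose string keys avoid k leaves k's entry alone
theorem pos_fold_notmem (L : List (Int × String × Int)) (k : String) :
    k ∉ L.map (·.2.1) → ∀ (n : Int) (d : PySem.Dict String Int),
    ((PySem.List.enumerate L n).foldl (fun d p => d.insert p.2.2.1 p.1) d).getD k 0 = d.getD k 0 := by
  induction L with
  | nil => intro _ n d; simp [PySem.List.enumerate]
  | cons z t ih =>
      intro hk n d
      rw [PySem.List.enumerate_cons, List.foldl_cons]
      have hkz : ¬ k = z.2.1 := by
        intro hh; exact hk (by simp [hh])
      rw [ih (by intro hh; exact hk (by simp [hh])) (n + 1)]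
      rw [PySem.Dict.getD_insert, if_neg hkz]

-- position dict built over a strictly key-sorted list with distinct string keys:
-- the entry of x's key is x's position, i.e. the number of items with a smaller sort key
theorem pos_getD (L : List (Int × String × Int))
    (hp : L.Pairwise (fun a b => pvKey a < pvKey b))
    (hnd : (L.map (·.2.1)).Nodup) :
    ∀ (x : Int × String × Int), x ∈ L → ∀ (n : Int) (d : PySem.Dict String Int),
    ((PySem.List.enumerate L n).foldl (fun d p => d.insert p.2.2.1 p.1) d).getD x.2.1 0 =
      n + (L.countP (fun y => decide (pvKey y < pvKey x)) : Int) := by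
  induction L with
  | nil => intro x hx; cases hx
  | cons z t ih =>
      intro x hx n d
      have hpc := List.pairwise_cons.mp hp
      have hndc := List.nodup_cons.mp hnd
      rw [PySem.List.enumerate_cons, List.foldl_cons]
      rcases List.mem_cons.mp hx with hx | hx
      · subst hx
        have h0 : List.countP (fun y => decide (pvKey y < pvKey x)) (x :: t) = 0 := by
          rw [List.countP_eq_zero]
          intro y hy
          rcases List.mem_cons.mp hy with hy | hy
          · subst hy; simp
          · simp only [decide_eq_true_eq]
            exact not_lt.mpr (le_of_lt (hpc.1 y hy))
        rw [h0, pos_fold_notmem t x.2.1 hndc.1 (n + 1), PySem.Dict.getD_insert_self]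
        simp
      · have hne : x.2.1 ≠ z.2.1 := by
          intro hh
          exact hndc.1 (List.mem_map.mpr ⟨x, hx, hh⟩)
        rw [ih hpc.2 hndc.2 x hx (n + 1)]
        have hzx : pvKey z < pvKey x := hpc.1 x hx
        rw [List.countP_cons, if_pos (by simpa using hzx)]
        push_cast
        ring

-- B's sort, with its tuple key, is the sort by the lexicographic-product key pvKey
theorem sorted2_eq_lex (xs : List (Int × String × Int)) :
    PySem.List.sorted2 xs (fun t => -t.2.2) (fun t => t.1) false =
    PySem.List.sorted xs pvKey false := by
  show xs.foldl _ [] = xs.foldl _ []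
  have hbf : (fun (a b : Int × String × Int) =>
        decide (-a.2.2 < -b.2.2) || (!decide (-b.2.2 < -a.2.2) && decide (a.1 < b.1))) =
      (fun a b => decide (pvKey a < pvKey b)) := by
    funext a b
    rw [Bool.eq_iff_iff]
    simp only [Bool.or_eq_true, Bool.and_eq_true, Bool.not_eq_true', decide_eq_true_eq,
      decide_eq_false_iff_not, pvKey, Prod.Lex.lt_iff, ofLex_toLex]
    omega
  rw [hbf]

-- splitting a count over a disjunction of mutually exclusive tests
theorem countP_or_split {α : Type} (p q : α → Bool) (L : List α)
    (h : ∀ x ∈ L, ¬(p x = true ∧ q x = true)) :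
    L.countP (fun x => p x || q x) = L.countP p + L.countP q := by
  induction L with
  | nil => rfl
  | cons z t ih =>
      have hz := h z List.mem_cons_self
      have ht := ih (fun x hx => h x (List.mem_cons_of_mem _ hx))
      simp only [List.countP_cons, ht]
      cases hp : p z <;> cases hq : q z <;> simp_all <;> omega

-- the two rank formulas coincide: position under pvKey = (#greater values) + (#earlier equal values)
theorem countP_key_split (e : List (Int × String × Int)) (x : Int × String × Int) :
    e.countP (fun y => decide (pvKey y < pvKey x)) =
      e.countP (fun y => decide (x.2.2 < y.2.2)) + pvEqB e x := by
  rw [pvEqB]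
  rw [show (fun y => decide (pvKey y < pvKey x)) =
      (fun (y : Int × String × Int) =>
        decide (x.2.2 < y.2.2) || decide (y.1 < x.1 ∧ y.2.2 = x.2.2)) from ?_]
  · exact countP_or_split _ _ e (by
      intro y _ hc
      have h1 := of_decide_eq_true hc.1
      have h2 := of_decide_eq_true hc.2
      omega)
  · funext y
    rw [Bool.eq_iff_iff]
    simp only [Bool.or_eq_true, decide_eq_true_eq, pvKey, Prod.Lex.lt_iff, ofLex_toLex]
    omega

-- a fold over the pairs is a fold over their enumeration
theorem foldl_snd {β : Type} (dic : List (String × Int)) (f : β → String × Int → β) (i : β) :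
    dic.foldl f i = (PySem.List.enumerate dic 0).foldl (fun a x => f a x.2) i := by
  conv_lhs => rw [← PySem.List.map_snd_enumerate dic 0]
  rw [List.foldl_map]

theorem ports_eq (dic : List (String × Int)) (hpre : (dic.map (·.1)).Nodup) :
    rearrange_dict dic = rearrange_dict_alt dic := by
  unfold rearrange_dict rearrange_dict_alt
  dsimp only
  have hs : (PySem.List.sorted (dic.map (·.2)) (fun x => x) true).Pairwise (· ≥ ·) := by
    have h := PySem.List.sorted_pairwise_rev (dic.map (·.2)) (fun x => x)
    exact h.imp (fun hab => hab)
  have hcnt : ∀ v, (fun _ : Int => (0 : Nat)) v + (dic.map (·.2)).count v =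
      (PySem.List.sorted (dic.map (·.2)) (fun x => x) true).count v := by
    intro v
    rw [(PySem.List.sorted_perm (dic.map (·.2)) (fun x => x) true).count_eq]
    simp
  -- A-side: mask loop → counter loop → explicit-rank fold over the enumeration
  have hA : (dic.foldl (fun (st : List (Option Int) × PySem.Dict String Int) kv =>
        let index := (PySem.List.index? st.1 (some kv.2)).getD 0
        (st.1.set index none, st.2.insert kv.1 (index : Int)))
      ((PySem.List.sorted (dic.map (·.2)) (fun x => x) true).map some, PySem.Dict.empty)).2 =
      (PySem.List.enumerate dic 0).foldl (fun d t => d.insert t.2.1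
        ((pvGt (PySem.List.sorted (dic.map (·.2)) (fun x => x) true) t.2.2 +
          pvEqB (PySem.List.enumerate dic 0) t : Nat) : Int)) PySem.Dict.empty := by
    rw [← pvMask_zero]
    rw [A_loop _ hs dic (fun _ => 0) PySem.Dict.empty hcnt]
    rw [foldl_snd]
    exact counter_to_rank _ (pvEqB (PySem.List.enumerate dic 0)) (PySem.List.enumerate dic 0)
      (fun _ => 0) PySem.Dict.empty (PySem.List.pairwise_lt_enumerate dic 0)
      (by intro x _; simp [pvEqB])
  -- B-side: positions in the key-sorted order are the same explicit ranks
  have hperm : (PySem.List.sorted (PySem.List.enumerate dic 0) pvKey false).Perm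
      (PySem.List.enumerate dic 0) := PySem.List.sorted_perm _ _ _
  have hndk : ((PySem.List.sorted (PySem.List.enumerate dic 0) pvKey false).map (·.2.1)).Nodup := by
    refine (hperm.map (·.2.1)).nodup_iff.mpr ?_
    have hcomp : (PySem.List.enumerate dic 0).map (·.2.1) = dic.map (·.1) := by
      rw [show ((·.2.1) : Int × String × Int → String) = (·.1) ∘ (·.2) from rfl,
        ← List.map_map, PySem.List.map_snd_enumerate]
    rw [hcomp]
    exact hpre
  have hstrict : (PySem.List.sorted (PySem.List.enumerate dic 0) pvKey false).Pairwise
      (fun a b => pvKey a < pvKey b) := by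
    have hle := PySem.List.sorted_pairwise (PySem.List.enumerate dic 0) pvKey
    have hnfst : ((PySem.List.sorted (PySem.List.enumerate dic 0) pvKey false).map (·.1)).Nodup := by
      refine (hperm.map (·.1)).nodup_iff.mpr ?_
      exact List.pairwise_map.mpr ((PySem.List.pairwise_lt_enumerate dic 0).imp (fun h => ne_of_lt h))
    have hnp := List.pairwise_map.mp hnfst
    exact (hle.and hnp).imp (fun hab =>
      lt_of_le_of_ne hab.1 (fun he' => hab.2 (congrArg (fun t => (ofLex t).2) he')))
  have hB : dic.foldl (fun (d : PySem.Dict String Int) kv => d.insert kv.1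
        (((PySem.List.enumerate (PySem.List.sorted2 (PySem.List.enumerate dic)
            (fun t => -t.2.2) (fun t => t.1) false)).foldl
          (fun d p => d.insert p.2.2.1 p.1) PySem.Dict.empty).getD kv.1 0)) PySem.Dict.empty =
      (PySem.List.enumerate dic 0).foldl (fun d t => d.insert t.2.1
        ((pvGt (PySem.List.sorted (dic.map (·.2)) (fun x => x) true) t.2.2 +
          pvEqB (PySem.List.enumerate dic 0) t : Nat) : Int)) PySem.Dict.empty := by
    rw [sorted2_eq_lex, foldl_snd]
    apply PySem.List.foldl_congr_mem
    intro acc x hx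
    show acc.insert x.2.1 _ = acc.insert x.2.1 _
    congr 1
    have hmem : x ∈ PySem.List.sorted (PySem.List.enumerate dic 0) pvKey false :=
      (PySem.List.mem_sorted _ _ _ _).mpr hx
    rw [pos_getD _ hstrict hndk x hmem 0 PySem.Dict.empty]
    rw [hperm.countP_eq, countP_key_split]
    have hgt : pvGt (PySem.List.sorted (dic.map (·.2)) (fun x => x) true) x.2.2 =
        (PySem.List.enumerate dic 0).countP (fun y => decide (x.2.2 < y.2.2)) := by
      rw [pvGt, (PySem.List.sorted_perm (dic.map (·.2)) (fun x => x) true).countP_eq]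
      rw [show dic.map (·.2) = (PySem.List.enumerate dic 0).map (·.2.2) from by
        rw [show ((·.2.2) : Int × String × Int → Int) = (·.2) ∘ (·.2) from rfl,
          ← List.map_map, PySem.List.map_snd_enumerate]]
      rw [List.countP_map]
      rfl
    rw [hgt]
    push_cast
    ring
  rw [hA, hB]

-- ===== VERDICT (by name: the statement is the Claim_ definition above) =====
theorem rearrange_dict_spec : Claim_equal_rearrange_dict := by
  intro dic _ hpre
  show rearrange_dict dic = rearrange_dict_alt dic
  exact ports_eq dic hpre
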